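-- pv_equiv track=rewrite | github.com/CrimenStory/icd_MIDAS | functions/Conteo de calificaciones por red social.py | contar_calificaciones
-- ===== SOURCE A (Python) =====
-- def contar_calificaciones(data):
--     conteo_calificaciones = {
--         "Google": 0,
--         "TripAdvisor": 0,
--         "Facebook": 0
--     }
--
--     for registro in data:
--         if "quality" in registro:
--             google_calif = registro["quality"].get("qualification_google")
--             tripadvisor_calif = registro["quality"].get("qualification_tripadvisor")
--             facebook_calif = registro["quality"].get("qualification_facebook")
--
--             # Contar solo si la calificación no es None
--             if google_calif is not None:
--                 conteo_calificaciones["Google"] += 1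
--             if tripadvisor_calif is not None:
--                 conteo_calificaciones["TripAdvisor"] += 1
--             if facebook_calif is not None:
--                 conteo_calificaciones["Facebook"] += 1
--
--     return conteo_calificaciones
-- ===== SOURCE B (Python) =====
-- def contar_calificaciones(data):
--     # Simpler decomposition: three independent per-network counts, one scan each.
--     def cuenta(clave):
--         return sum(1 for r in data
--                    if "quality" in r and r["quality"].get(clave) is not None)
--
--     return {
--         "Google": cuenta("qualification_google"),
--         "TripAdvisor": cuenta("qualification_tripadvisor"),
--         "Facebook": cuenta("qualification_facebook"),
--     }
-- ===== Notes on version B (the rewrite author's own statement) =====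
-- stated objective: simpler
-- what changed: Replaces A's single pass that mutates a shared counter dict with three independent generator-sum counts, one per social network, assembled directly into the result dict.
import Mathlib
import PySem

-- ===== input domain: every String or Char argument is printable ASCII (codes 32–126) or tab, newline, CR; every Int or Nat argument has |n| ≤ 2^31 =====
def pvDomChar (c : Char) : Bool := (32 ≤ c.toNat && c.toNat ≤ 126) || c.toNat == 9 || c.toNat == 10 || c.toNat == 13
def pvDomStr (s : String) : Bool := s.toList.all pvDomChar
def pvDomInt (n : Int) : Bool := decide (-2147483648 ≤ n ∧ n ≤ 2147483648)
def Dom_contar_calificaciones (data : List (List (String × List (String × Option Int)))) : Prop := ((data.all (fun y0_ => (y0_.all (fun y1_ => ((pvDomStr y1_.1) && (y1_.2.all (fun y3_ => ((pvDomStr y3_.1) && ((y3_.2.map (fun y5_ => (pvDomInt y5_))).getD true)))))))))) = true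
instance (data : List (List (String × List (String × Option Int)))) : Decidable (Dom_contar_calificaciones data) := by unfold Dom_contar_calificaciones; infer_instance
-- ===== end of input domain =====

-- B replaces A's single counter-dict-mutating pass with three independent per-network counts (simpler decomposition; same cost).


-- ===== PORT A =====
-- A's loop body: look up "quality" (first match), take .get of each key (Python .get
-- flattens a stored None and a missing key to None: Option.join), bump the counter
-- dict for each non-None rating.  Exact transliteration, dict kept as PySem.Dict.
def contar_calificaciones (data : List (List (String × List (String × Option Int)))) : List (String × Int) :=
  (data.foldl (fun conteo registro =>
    match registro.lookup "quality" with
    | none => conteo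
    | some quality =>
      let google_calif : Option Int := (quality.lookup "qualification_google").join
      let tripadvisor_calif : Option Int := (quality.lookup "qualification_tripadvisor").join
      let facebook_calif : Option Int := (quality.lookup "qualification_facebook").join
      let conteo := if google_calif.isSome then conteo.insert "Google" (conteo.getD "Google" 0 + 1) else conteo
      let conteo := if tripadvisor_calif.isSome then conteo.insert "TripAdvisor" (conteo.getD "TripAdvisor" 0 + 1) else conteo
      if facebook_calif.isSome then conteo.insert "Facebook" (conteo.getD "Facebook" 0 + 1) else conteo)
    (((PySem.Dict.empty.insert "Google" 0).insert "TripAdvisor" 0).insert "Facebook" 0)).items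

-- ===== PORT B =====
-- B's generator sum: sum(1 for r in data if "quality" in r and r["quality"].get(clave) is not None)
def cuentaB (data : List (List (String × List (String × Option Int)))) (clave : String) : Int :=
  (data.map (fun r =>
    match r.lookup "quality" with
    | some q => if ((q.lookup clave).join).isSome then (1 : Int) else 0
    | none => 0)).sum

def contar_calificaciones_alt (data : List (List (String × List (String × Option Int)))) : List (String × Int) :=
  [("Google", cuentaB data "qualification_google"),
   ("TripAdvisor", cuentaB data "qualification_tripadvisor"),
   ("Facebook", cuentaB data "qualification_facebook")]

-- ===== PRECONDITION & SPEC =====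
def Spec_contar_calificaciones (data : List (List (String × List (String × Option Int)))) (out : List (String × Int)) : Prop := out = contar_calificaciones_alt data
instance (data : List (List (String × List (String × Option Int)))) (out : List (String × Int)) : Decidable (Spec_contar_calificaciones data out) := by unfold Spec_contar_calificaciones; infer_instance

-- ===== CLAIM (what is proved, stated in full; the proofs are below) =====
def Claim_equal_contar_calificaciones : Prop := ∀ (data : List (List (String × List (String × Option Int)))), Dom_contar_calificaciones data → Spec_contar_calificaciones data (contar_calificaciones data)

-- ===== LEMMAS AND PROOFS =====

-- the shape A's counter dict always has
def mk3 (g t f : Int) : PySem.Dict String Int :=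
  PySem.Dict.mk [("Google", g), ("TripAdvisor", t), ("Facebook", f)]

-- per-record increment for one key (= B's summand)
def delta (r : List (String × List (String × Option Int))) (clave : String) : Int :=
  match r.lookup "quality" with
  | some q => if ((q.lookup clave).join).isSome then (1 : Int) else 0
  | none => 0

theorem mk3_insert_g (g t f v : Int) : (mk3 g t f).insert "Google" v = mk3 v t f := by
  simp [mk3, PySem.Dict.insert, PySem.Dict.contains]

theorem mk3_insert_t (g t f v : Int) : (mk3 g t f).insert "TripAdvisor" v = mk3 g v f := by
  simp [mk3, PySem.Dict.insert, PySem.Dict.contains]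

theorem mk3_insert_f (g t f v : Int) : (mk3 g t f).insert "Facebook" v = mk3 g t v := by
  simp [mk3, PySem.Dict.insert, PySem.Dict.contains]

theorem mk3_getD_g (g t f : Int) : (mk3 g t f).getD "Google" 0 = g := by
  simp [mk3, PySem.Dict.getD, PySem.Dict.get?]

theorem mk3_getD_t (g t f : Int) : (mk3 g t f).getD "TripAdvisor" 0 = t := by
  simp [mk3, PySem.Dict.getD, PySem.Dict.get?]

theorem mk3_getD_f (g t f : Int) : (mk3 g t f).getD "Facebook" 0 = f := by
  simp [mk3, PySem.Dict.getD, PySem.Dict.get?]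

-- one step of A's loop on the invariant shape
theorem step_mk3 (g t f : Int) (r : List (String × List (String × Option Int))) :
    (match r.lookup "quality" with
    | none => mk3 g t f
    | some quality =>
      let google_calif : Option Int := (quality.lookup "qualification_google").join
      let tripadvisor_calif : Option Int := (quality.lookup "qualification_tripadvisor").join
      let facebook_calif : Option Int := (quality.lookup "qualification_facebook").join
      let conteo := if google_calif.isSome then (mk3 g t f).insert "Google" ((mk3 g t f).getD "Google" 0 + 1) else mk3 g t f
      let conteo := if tripadvisor_calif.isSome then conteo.insert "TripAdvisor" (conteo.getD "TripAdvisor" 0 + 1) else conteo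
      if facebook_calif.isSome then conteo.insert "Facebook" (conteo.getD "Facebook" 0 + 1) else conteo)
    = mk3 (g + delta r "qualification_google") (t + delta r "qualification_tripadvisor") (f + delta r "qualification_facebook") := by
  unfold delta
  cases r.lookup "quality" with
  | none => simp
  | some q =>
    simp only
    split_ifs <;>
      simp_all [mk3_insert_g, mk3_insert_t, mk3_insert_f, mk3_getD_g, mk3_getD_t, mk3_getD_f]

theorem foldl_mk3 (data : List (List (String × List (String × Option Int)))) (g t f : Int) :
    data.foldl (fun conteo registro =>
      match registro.lookup "quality" with
      | none => conteo
      | some quality =>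
        let google_calif : Option Int := (quality.lookup "qualification_google").join
        let tripadvisor_calif : Option Int := (quality.lookup "qualification_tripadvisor").join
        let facebook_calif : Option Int := (quality.lookup "qualification_facebook").join
        let conteo := if google_calif.isSome then conteo.insert "Google" (conteo.getD "Google" 0 + 1) else conteo
        let conteo := if tripadvisor_calif.isSome then conteo.insert "TripAdvisor" (conteo.getD "TripAdvisor" 0 + 1) else conteo
        if facebook_calif.isSome then conteo.insert "Facebook" (conteo.getD "Facebook" 0 + 1) else conteo)
      (mk3 g t f)
    = mk3 (g + cuentaB data "qualification_google") (t + cuentaB data "qualification_tripadvisor")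
          (f + cuentaB data "qualification_facebook") := by
  induction data generalizing g t f with
  | nil => simp [cuentaB]
  | cons r rest ih =>
    rw [List.foldl_cons, step_mk3, ih]
    simp [cuentaB, delta, Int.add_assoc]

-- ===== VERDICT (by name: the statement is the Claim_ definition above) =====
theorem contar_calificaciones_spec : Claim_equal_contar_calificaciones := by
  intro data _
  show contar_calificaciones data = contar_calificaciones_alt data
  unfold contar_calificaciones
  have h0 : (((PySem.Dict.empty.insert "Google" (0:Int)).insert "TripAdvisor" 0).insert "Facebook" 0) = mk3 0 0 0 := by decide
  rw [h0, foldl_mk3]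
  simp [mk3, contar_calificaciones_alt]
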